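-- pv_equiv track=rewrite | github.com/imkzuma/TBO | DFA/main.py | Suffix
-- ===== SOURCE A (Python) =====
-- def Suffix(state , string):
--     finishState= 'q3'
--
--     if len(string) >= 1:
--         suffixString = string[-3:]
--         if state == "q0":
--             if suffixString[0] == "1":
--                 return Suffix("q1", suffixString[1:])
--             else:
--                 return Suffix("q0", suffixString[1:])
--
--         elif state == "q1":
--             if suffixString[0] == "0":
--                 return Suffix("q2", suffixString[1:])
--             else:
--                 return Suffix("q1", suffixString[1:])
--
--         elif state == "q2":
--             if suffixString[0] == "1":
--                 return Suffix("q3", suffixString[1:])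
--             else:
--                 return Suffix("q0", suffixString[1:])
--
--         elif state == finishState : return finishState
--
--     return state
-- ===== SOURCE B (Python) =====
-- def Suffix(state, string):
--     for ch in string[-3:]:
--         if state == "q0":
--             state = "q1" if ch == "1" else "q0"
--         elif state == "q1":
--             state = "q2" if ch == "0" else "q1"
--         elif state == "q2":
--             state = "q3" if ch == "1" else "q0"
--         else:
--             break
--     return state
-- ===== Notes on version B (the rewrite author's own statement) =====
-- stated objective: idiomatic
-- what changed: Replaces the tail recursion (which re-slices string[-3:] on every call) with a single slice and one explicit left-to-right loop over the last three characters, updating the state in place and breaking once q3 or an unknown state is reached.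
import Mathlib
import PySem

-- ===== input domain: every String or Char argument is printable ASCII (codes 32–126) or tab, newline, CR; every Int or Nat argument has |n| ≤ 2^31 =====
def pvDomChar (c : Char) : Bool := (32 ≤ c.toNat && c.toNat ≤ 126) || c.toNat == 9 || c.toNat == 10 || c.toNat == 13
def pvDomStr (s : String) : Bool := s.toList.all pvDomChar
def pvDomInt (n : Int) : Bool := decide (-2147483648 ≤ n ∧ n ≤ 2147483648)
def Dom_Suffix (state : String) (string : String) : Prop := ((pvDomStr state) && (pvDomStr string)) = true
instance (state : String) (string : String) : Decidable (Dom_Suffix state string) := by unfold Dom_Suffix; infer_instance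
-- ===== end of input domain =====

-- B replaces A's tail recursion by a single slice and one explicit loop with break (idiomatic; same cost).

-- ===== PORT A =====
-- literal transliteration of A's recursion, on the character list of `string`
def SuffixA (state : String) (cs : List Char) : String :=
  if _h : 1 ≤ cs.length then
    -- suffixString = string[-3:]
    if state = "q0" then
      (if PySem.List.pyGet? (PySem.List.slice cs (some (-3)) none) 0 = some '1'
       then SuffixA "q1" (PySem.List.slice (PySem.List.slice cs (some (-3)) none) (some 1) none)
       else SuffixA "q0" (PySem.List.slice (PySem.List.slice cs (some (-3)) none) (some 1) none))
    else if state = "q1" then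
      (if PySem.List.pyGet? (PySem.List.slice cs (some (-3)) none) 0 = some '0'
       then SuffixA "q2" (PySem.List.slice (PySem.List.slice cs (some (-3)) none) (some 1) none)
       else SuffixA "q1" (PySem.List.slice (PySem.List.slice cs (some (-3)) none) (some 1) none))
    else if state = "q2" then
      (if PySem.List.pyGet? (PySem.List.slice cs (some (-3)) none) 0 = some '1'
       then SuffixA "q3" (PySem.List.slice (PySem.List.slice cs (some (-3)) none) (some 1) none)
       else SuffixA "q0" (PySem.List.slice (PySem.List.slice cs (some (-3)) none) (some 1) none))
    else if state = "q3" then "q3"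
    else state
  else state
termination_by cs.length
decreasing_by
  all_goals
    rw [PySem.List.slice_from_one, PySem.List.slice_from_neg_ofNat cs 3 (by norm_num)]
    simp only [List.length_tail, List.length_drop]
    omega

def Suffix (state : String) (string : String) : String :=
  SuffixA state string.toList

-- ===== PORT B =====
-- the explicit for/break loop over the last three characters
def SuffixLoop (state : String) : List Char → String
  | [] => state
  | c :: rest =>
    if state = "q0" then SuffixLoop (if c = '1' then "q1" else "q0") rest
    else if state = "q1" then SuffixLoop (if c = '0' then "q2" else "q1") rest
    else if state = "q2" then SuffixLoop (if c = '1' then "q3" else "q0") rest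
    else state  -- break

def Suffix_alt (state : String) (string : String) : String :=
  SuffixLoop state (PySem.List.slice string.toList (some (-3)) none)

-- ===== PRECONDITION & SPEC =====
def Spec_Suffix (state : String) (string : String) (out : String) : Prop := out = Suffix_alt state string
instance (state : String) (string : String) (out : String) : Decidable (Spec_Suffix state string out) := by unfold Spec_Suffix; infer_instance

-- ===== CLAIM (what is proved, stated in full; the proofs are below) =====
def Claim_equal_Suffix : Prop := ∀ (state : String) (string : String), Dom_Suffix state string → Spec_Suffix state string (Suffix state string)

-- ===== LEMMAS AND PROOFS =====

lemma suffixA_eq_loop : ∀ (n : Nat) (cs : List Char), cs.length ≤ n → ∀ (state : String),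
    SuffixA state cs = SuffixLoop state (PySem.List.slice cs (some (-3)) none) := by
  intro n
  induction n with
  | zero =>
    intro cs hlen state
    have hnil : cs = [] := List.length_eq_zero_iff.mp (Nat.le_zero.mp hlen)
    subst hnil
    simp [SuffixA, PySem.List.slice, SuffixLoop]
  | succ n ih =>
    intro cs hlen state
    rcases cs with _ | ⟨c, cs'⟩
    · simp [SuffixA, PySem.List.slice, SuffixLoop]
    · have h1 : 1 ≤ (c :: cs').length := by simp
      have hs : PySem.List.slice (c :: cs') (some (-3)) none
          = (c :: cs').drop ((c :: cs').length - 3) :=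
        PySem.List.slice_from_neg_ofNat _ 3 (by norm_num)
      -- the slice of a nonempty list by [-3:] is nonempty
      have hne : PySem.List.slice (c :: cs') (some (-3)) none ≠ [] := by
        rw [hs]; simp
      rcases hd : PySem.List.slice (c :: cs') (some (-3)) none with _ | ⟨d, t⟩
      · exact absurd hd hne
      · -- the tail after consuming one char is short and already its own [-3:] slice
        have hlen2 : t.length + 1 = cs'.length + 1 - (cs'.length + 1 - 3) := by
          have := congrArg List.length hd
          rw [hs] at this
          simp only [List.length_drop, List.length_cons] at this
          omega
        have ht3 : PySem.List.slice t (some (-3)) none = t := by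
          rw [PySem.List.slice_from_neg_ofNat t 3 (by norm_num)]
          have h0 : t.length - 3 = 0 := by omega
          rw [h0]; rfl
        have hihn : t.length ≤ n := by simp only [List.length_cons] at hlen2 hlen; omega
        rw [show SuffixA state (c :: cs')
            = (if state = "q0" then
                (if PySem.List.pyGet? (PySem.List.slice (c :: cs') (some (-3)) none) 0 = some '1'
                 then SuffixA "q1" (PySem.List.slice (PySem.List.slice (c :: cs') (some (-3)) none) (some 1) none)
                 else SuffixA "q0" (PySem.List.slice (PySem.List.slice (c :: cs') (some (-3)) none) (some 1) none))
               else if state = "q1" then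
                (if PySem.List.pyGet? (PySem.List.slice (c :: cs') (some (-3)) none) 0 = some '0'
                 then SuffixA "q2" (PySem.List.slice (PySem.List.slice (c :: cs') (some (-3)) none) (some 1) none)
                 else SuffixA "q1" (PySem.List.slice (PySem.List.slice (c :: cs') (some (-3)) none) (some 1) none))
               else if state = "q2" then
                (if PySem.List.pyGet? (PySem.List.slice (c :: cs') (some (-3)) none) 0 = some '1'
                 then SuffixA "q3" (PySem.List.slice (PySem.List.slice (c :: cs') (some (-3)) none) (some 1) none)
                 else SuffixA "q0" (PySem.List.slice (PySem.List.slice (c :: cs') (some (-3)) none) (some 1) none))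
               else if state = "q3" then "q3"
               else state) from by rw [SuffixA]; simp]
        rw [hd]
        simp only [PySem.List.slice_from_one, List.tail_cons, PySem.List.pyGet?, PySem.List.pyIdx?]
        have hrec := fun st => (ih t hihn st).trans (by rw [ht3])
        by_cases h0 : state = "q0"
        · subst h0
          simp only [SuffixLoop]
          by_cases hc : d = '1' <;> simp [hc, hrec]
        · by_cases hq1 : state = "q1"
          · subst hq1
            simp only [SuffixLoop]
            norm_num
            by_cases hc : d = '0' <;> simp [hc, hrec]
          · by_cases hq2 : state = "q2"
            · subst hq2
              simp only [SuffixLoop]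
              norm_num
              by_cases hc : d = '1' <;> simp [hc, hrec]
            · by_cases hq3 : state = "q3"
              · subst hq3; simp [SuffixLoop]
              · simp [SuffixLoop, h0, hq1, hq2, hq3]

-- ===== VERDICT (by name: the statement is the Claim_ definition above) =====
theorem Suffix_spec : Claim_equal_Suffix := by
  intro state string _
  unfold Spec_Suffix Suffix Suffix_alt
  exact suffixA_eq_loop string.toList.length string.toList le_rfl state
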